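-- pv_equiv track=rewrite | github.com/VishakhaChopade31/Basic-Chatbot | CodeAlpha_Python_Projects/CodeAlpha_Python_Projects/Basic_Chatbot/chatbot.py | format_bot
-- ===== SOURCE A (Python) =====
-- def format_bot(message: str) -> str:
--     """Prefix every bot line with the bot label."""
--     lines = message.split("\n")
--     formatted = []
--     for i, line in enumerate(lines):
--         if i == 0:
--             formatted.append(f"\n  🤖 CodeBot : {line}")
--         else:
--             formatted.append(f"              {line}")
--     return "\n".join(formatted)
-- ===== SOURCE B (Python) =====
-- def format_bot(message: str) -> str:
--     """Prefix every bot line with the bot label."""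
--     return "\n  🤖 CodeBot : " + message.replace("\n", "\n" + " " * 14)
-- ===== Notes on version B (the rewrite author's own statement) =====
-- stated objective: simpler
-- what changed: Replaces the split/enumerate/append/join loop with a single string.replace that turns every newline into a newline plus the 14-space indent, prefixed by the fixed label.
import Mathlib
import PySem

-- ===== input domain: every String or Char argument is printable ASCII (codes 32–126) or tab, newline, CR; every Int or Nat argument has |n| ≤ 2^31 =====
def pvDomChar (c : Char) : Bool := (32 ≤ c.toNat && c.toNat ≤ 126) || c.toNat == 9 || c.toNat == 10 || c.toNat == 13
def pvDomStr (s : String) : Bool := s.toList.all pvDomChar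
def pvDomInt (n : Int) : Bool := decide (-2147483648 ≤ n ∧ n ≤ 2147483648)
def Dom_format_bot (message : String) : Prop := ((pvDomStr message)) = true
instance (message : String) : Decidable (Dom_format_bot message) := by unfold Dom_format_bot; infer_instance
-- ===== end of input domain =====

-- B prepends the fixed label and uses one str.replace("\n", "\n" + 14 spaces) instead of A's
-- split/enumerate/append/join loop (objective: simpler).


-- ===== PORT A =====
-- message.split("\n") with the non-empty separator "\n" is PySem.Chars.splitOn; the loop over
-- enumerate(lines) appends the labelled first line / indented later lines; "\n".join at the end.
def format_bot (message : String) : String :=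
  let lines := PySem.Chars.splitOn message.toList "\n".toList
  let formatted := (PySem.List.enumerate lines).foldl
    (fun acc p =>
      if p.1 = 0 then acc ++ ["\n  🤖 CodeBot : ".toList ++ p.2]
      else acc ++ ["              ".toList ++ p.2]) []
  String.ofList (PySem.Chars.join "\n".toList formatted)

-- ===== PORT B =====
-- label + message.replace("\n", "\n" + " " * 14)
def format_bot_alt (message : String) : String :=
  String.ofList ("\n  🤖 CodeBot : ".toList ++
    PySem.Chars.replace message.toList "\n".toList ("\n".toList ++ "              ".toList))

-- ===== PRECONDITION & SPEC =====
def Spec_format_bot (message : String) (out : String) : Prop := out = format_bot_alt message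
instance (message : String) (out : String) : Decidable (Spec_format_bot message out) := by unfold Spec_format_bot; infer_instance

-- ===== CLAIM (what is proved, stated in full; the proofs are below) =====
def Claim_equal_format_bot : Prop := ∀ (message : String), Dom_format_bot message → Spec_format_bot message (format_bot message)

-- ===== LEMMAS AND PROOFS =====

-- accumulator-free form of PySem.Chars.splitOn.go
def splitF (sep : List Char) : Nat → List Char → List (List Char)
  | 0, l => [l]
  | _+1, [] => [[]]
  | fuel+1, c :: t =>
    if sep.isPrefixOf (c :: t) then [] :: splitF sep fuel (List.drop sep.length (c :: t))
    else (splitF sep fuel t).modifyHead (c :: ·)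

-- accumulator-free form of PySem.Chars.replace.go
def replaceF (old new : List Char) : Nat → List Char → List Char
  | 0, l => l
  | _+1, [] => []
  | fuel+1, c :: t =>
    if old.isPrefixOf (c :: t) then new ++ replaceF old new fuel (List.drop old.length (c :: t))
    else c :: replaceF old new fuel t

theorem splitF_ne_nil (sep : List Char) (fuel : Nat) (l : List Char) : splitF sep fuel l ≠ [] := by
  match fuel, l with
  | 0, l => simp [splitF]
  | fuel+1, [] => simp [splitF]
  | fuel+1, c :: t =>
    simp only [splitF]
    split
    · simp
    · cases h : splitF sep fuel t with
      | nil => exact absurd h (splitF_ne_nil sep fuel t)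
      | cons a as => simp [List.modifyHead]

theorem splitOn_go_eq (sep : List Char) (fuel : Nat) (l cur : List Char) (acc : List (List Char)) :
    PySem.Chars.splitOn.go sep fuel l cur acc
      = acc.reverse ++ (splitF sep fuel l).modifyHead (cur.reverse ++ ·) := by
  match fuel, l with
  | 0, l => simp [PySem.Chars.splitOn.go, splitF, List.modifyHead]
  | fuel+1, [] => simp [PySem.Chars.splitOn.go, splitF, List.modifyHead]
  | fuel+1, c :: t =>
    rw [PySem.Chars.splitOn.go]
    simp only [splitF]
    split
    · rw [splitOn_go_eq]
      cases h : splitF sep fuel (List.drop sep.length (c :: t)) with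
      | nil => exact absurd h (splitF_ne_nil _ _ _)
      | cons a as => simp [List.modifyHead]
    · rw [splitOn_go_eq]
      cases h : splitF sep fuel t with
      | nil => exact absurd h (splitF_ne_nil _ _ _)
      | cons a as => simp [List.modifyHead]

theorem replace_go_eq (old new : List Char) (fuel : Nat) (l acc : List Char) :
    PySem.Chars.replace.go old new fuel l acc = acc.reverse ++ replaceF old new fuel l := by
  match fuel, l with
  | 0, l => simp [PySem.Chars.replace.go, replaceF]
  | fuel+1, [] => simp [PySem.Chars.replace.go, replaceF]
  | fuel+1, c :: t =>
    rw [PySem.Chars.replace.go]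
    simp only [replaceF]
    split
    · rw [replace_go_eq]; simp
    · rw [replace_go_eq]; simp

theorem join_cons_ne_nil (sep a : List Char) (b : List Char) (L : List (List Char)) :
    PySem.Chars.join sep (a :: b :: L) = a ++ sep ++ PySem.Chars.join sep (b :: L) := by
  simp [PySem.Chars.join, List.intercalate]

theorem join_head_append (sep a x : List Char) (L : List (List Char)) :
    PySem.Chars.join sep ((a ++ x) :: L) = a ++ PySem.Chars.join sep (x :: L) := by
  cases L with
  | nil => simp [PySem.Chars.join, List.intercalate]
  | cons b bs => rw [join_cons_ne_nil, join_cons_ne_nil]; simp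

-- replaceF computes join new ∘ splitF, for non-empty old and enough fuel (fuel-independently)
theorem replaceF_eq_join_splitF (old new : List Char) (hold : old ≠ [])
    (fuel1 fuel2 : Nat) (l : List Char) (h1 : l.length ≤ fuel1) (h2 : l.length ≤ fuel2) :
    replaceF old new fuel1 l = PySem.Chars.join new (splitF old fuel2 l) := by
  match fuel1, fuel2, l with
  | 0, 0, l =>
    interval_cases hl : l.length
    · simp_all [List.length_eq_zero_iff.mp hl, replaceF, splitF, PySem.Chars.join, List.intercalate]
  | 0, f2+1, l =>
    have : l = [] := List.length_eq_zero_iff.mp (Nat.le_zero.mp h1)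
    subst this
    simp [replaceF, splitF, PySem.Chars.join, List.intercalate]
  | f1+1, 0, l =>
    have : l = [] := List.length_eq_zero_iff.mp (Nat.le_zero.mp h2)
    subst this
    simp [replaceF, splitF, PySem.Chars.join, List.intercalate]
  | f1+1, f2+1, [] =>
    simp [replaceF, splitF, PySem.Chars.join, List.intercalate]
  | f1+1, f2+1, c :: t =>
    simp only [replaceF, splitF]
    split
    · rename_i hp
      have hlen : old.length ≥ 1 := by
        cases old with
        | nil => exact absurd rfl hold
        | cons o os => simp
      have hd : (List.drop old.length (c :: t)).length ≤ f1 := by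
        simp only [List.length_drop, List.length_cons] at h1 ⊢
        omega
      have hd2 : (List.drop old.length (c :: t)).length ≤ f2 := by
        simp only [List.length_drop, List.length_cons] at h2 ⊢
        omega
      rw [replaceF_eq_join_splitF old new hold f1 f2 _ hd hd2]
      cases h : splitF old f2 (List.drop old.length (c :: t)) with
      | nil => exact absurd h (splitF_ne_nil _ _ _)
      | cons a as => rw [join_cons_ne_nil]; simp
    · have ht1 : t.length ≤ f1 := by simp only [List.length_cons] at h1; omega
      have ht2 : t.length ≤ f2 := by simp only [List.length_cons] at h2; omega
      rw [replaceF_eq_join_splitF old new hold f1 f2 t ht1 ht2]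
      cases h : splitF old f2 t with
      | nil => exact absurd h (splitF_ne_nil _ _ _)
      | cons a as =>
        simp only [List.modifyHead]
        cases as with
        | nil => simp [PySem.Chars.join, List.intercalate]
        | cons b bs => rw [join_cons_ne_nil, join_cons_ne_nil]; simp

-- the nonzero-index tail of A's loop only takes the else branch
theorem foldl_tail_eq (ind : List Char) (rest : List (List Char)) (s : Int) (hs : 1 ≤ s)
    (acc : List (List Char)) :
    (PySem.List.enumerate rest s).foldl
      (fun acc p =>
        if p.1 = 0 then acc ++ ["\n  🤖 CodeBot : ".toList ++ p.2]
        else acc ++ [ind ++ p.2]) acc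
      = acc ++ rest.map (ind ++ ·) := by
  induction rest generalizing s acc with
  | nil => simp [PySem.List.enumerate]
  | cons r rs ih =>
    rw [PySem.List.enumerate_cons]
    have hne : ¬ (s = 0) := by omega
    simp only [List.foldl_cons, if_neg hne]
    rw [ih (s + 1) (by omega)]
    simp

-- join "\n" with indented tail = join ("\n" ++ ind) of the raw pieces
theorem join_map_indent (nl ind p0 : List Char) (rest : List (List Char)) :
    PySem.Chars.join nl (p0 :: rest.map (ind ++ ·))
      = PySem.Chars.join (nl ++ ind) (p0 :: rest) := by
  induction rest generalizing p0 with
  | nil => simp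
  | cons r rs ih =>
    simp only [List.map_cons]
    rw [join_cons_ne_nil, ih (ind ++ r), join_head_append,
      join_cons_ne_nil (nl ++ ind) p0 r rs]
    simp

-- ===== VERDICT (by name: the statement is the Claim_ definition above) =====
set_option maxHeartbeats 1000000 in
theorem format_bot_spec : Claim_equal_format_bot := by
  intro message _hdom
  have hold : ("\n".toList : List Char) ≠ [] := by decide
  show String.ofList (PySem.Chars.join "\n".toList
      ((PySem.List.enumerate (PySem.Chars.splitOn message.toList "\n".toList)).foldl
        (fun acc p =>
          if p.1 = 0 then acc ++ ["\n  🤖 CodeBot : ".toList ++ p.2]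
          else acc ++ ["              ".toList ++ p.2]) []))
    = String.ofList ("\n  🤖 CodeBot : ".toList ++
        PySem.Chars.replace message.toList "\n".toList
          ("\n".toList ++ "              ".toList))
  congr 1
  -- splitOn in terms of splitF
  have hsplit : PySem.Chars.splitOn message.toList "\n".toList
      = splitF "\n".toList (message.toList.length + 1) message.toList := by
    rw [PySem.Chars.splitOn, splitOn_go_eq]
    cases h : splitF "\n".toList (message.toList.length + 1) message.toList with
    | nil => exact absurd h (splitF_ne_nil _ _ _)
    | cons a as => simp [List.modifyHead]
  -- replace in terms of splitF/join
  have hrep : PySem.Chars.replace message.toList "\n".toList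
        ("\n".toList ++ "              ".toList)
      = PySem.Chars.join ("\n".toList ++ "              ".toList)
          (splitF "\n".toList (message.toList.length + 1) message.toList) := by
    rw [PySem.Chars.replace, if_neg (by decide), replace_go_eq]
    simp only [List.reverse_nil, List.nil_append]
    exact replaceF_eq_join_splitF _ _ hold message.toList.length
      (message.toList.length + 1) message.toList le_rfl (by omega)
  rw [hsplit, hrep]
  -- the fold over enumerate
  cases h : splitF "\n".toList (message.toList.length + 1) message.toList with
  | nil => exact absurd h (splitF_ne_nil _ _ _)
  | cons p0 rest =>
    rw [PySem.List.enumerate_cons]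
    simp only [List.foldl_cons, if_true, zero_add, List.nil_append]
    rw [foldl_tail_eq "              ".toList rest 1 le_rfl]
    simp only [List.singleton_append]
    rw [join_head_append, join_map_indent]
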